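-- pv_equiv track=rewrite | github.com/pypi-data/pypi-mirror-279 | packages/scaae/scaae-0.2.0a0.tar.gz/scaae-0.2.0a0/scaae/data/reading.py | _create_unique_ids
-- ===== SOURCE A (Python) =====
-- import itertools
-- from string import ascii_uppercase as uppercase_letters
--
-- def _create_unique_ids(size, pool=None, ids=None):
--     if pool is None:
--         pool = uppercase_letters
--     pool = list(pool)
--
--     if ids is None:
--         ids = pool
--
--     if len(ids) >= size:
--         return ids[:size]
--     else:
--         ids = ["".join(id) for id in itertools.product(ids, pool)]
--         return _create_unique_ids(size=size, ids=ids, pool=pool)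
-- ===== SOURCE B (Python) =====
-- from string import ascii_uppercase as uppercase_letters
--
-- def _create_unique_ids(size, pool=None, ids=None):
--     if pool is None:
--         pool = uppercase_letters
--     pool = list(pool)
--     if ids is None:
--         ids = pool
--     n, P = len(ids), len(pool)
--     if n >= size:
--         return ids[:size]
--     # minimal k with n * P**k >= size, then map each index directly to its id
--     k, cap = 0, n
--     while cap < size:
--         cap *= P
--         k += 1
--     out = []
--     for m in range(size):
--         q, digits = m, []
--         for _ in range(k):
--             q, r = divmod(q, P)
--             digits.append(pool[r])
--         out.append(ids[q] + "".join(reversed(digits)))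
--     return out
-- ===== Notes on version B (the rewrite author's own statement) =====
-- stated objective: faster
-- what changed: Instead of repeatedly building the full cartesian-product list level by level until it is long enough, B computes the needed width k once and maps each index 0..size-1 directly to ids[m // P^k] plus its base-P digit string, so only the `size` returned ids are ever constructed.
import Mathlib
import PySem

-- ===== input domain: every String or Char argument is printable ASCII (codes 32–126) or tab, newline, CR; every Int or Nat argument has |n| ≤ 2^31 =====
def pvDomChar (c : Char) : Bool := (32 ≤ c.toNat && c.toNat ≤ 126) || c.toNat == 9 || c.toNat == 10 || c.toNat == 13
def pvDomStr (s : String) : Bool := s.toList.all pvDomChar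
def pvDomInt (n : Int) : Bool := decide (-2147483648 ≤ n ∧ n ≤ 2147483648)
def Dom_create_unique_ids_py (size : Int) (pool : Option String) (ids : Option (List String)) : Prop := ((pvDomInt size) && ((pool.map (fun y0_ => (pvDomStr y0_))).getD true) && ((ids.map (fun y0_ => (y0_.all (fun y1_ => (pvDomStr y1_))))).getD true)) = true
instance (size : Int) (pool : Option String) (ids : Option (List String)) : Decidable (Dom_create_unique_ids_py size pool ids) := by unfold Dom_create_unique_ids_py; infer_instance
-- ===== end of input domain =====

-- B computes the final id width k once and maps each index 0..size-1 directly to its id,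
-- instead of materialising every cartesian-product level in full (objective: faster).

-- ===== PORT A =====
-- list(pool) for the (defaulted) pool: the list of its characters as 1-char strings
def pvPoolList (pool : Option String) : List String :=
  (pool.getD "ABCDEFGHIJKLMNOPQRSTUVWXYZ").toList.map (fun c => String.ofList [c])

-- ids = ["".join(id) for id in itertools.product(ids, pool)]  ("".join of a pair is ++)
def pvExpand (pool ids : List String) : List String :=
  ids.flatMap (fun i => pool.map (fun c => i ++ c))

-- A's recursion, fuelled (Python recurses unboundedly; on Pre_ inputs the fuel-0 branch is
-- unreachable — length ≥ 1 doubles each level, so 64 levels cover every size ≤ 2^31)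
def pvALoop (size : Int) (pool : List String) : List String → Nat → List String
  | ids, 0 => PySem.List.slice ids none (some size)
  | ids, fuel+1 =>
    if size ≤ (ids.length : Int) then PySem.List.slice ids none (some size)
    else pvALoop size pool (pvExpand pool ids) fuel

def create_unique_ids_py (size : Int) (pool : Option String) (ids : Option (List String)) : List String :=
  let poolL := pvPoolList pool
  pvALoop size poolL (ids.getD poolL) 64

-- ===== PORT B =====
-- the `while cap < size: cap *= P; k += 1` loop of Source B, fuelled (64 suffices on Pre_ inputs)
def pvBK (size : Int) (P : Nat) : Nat → Nat → Nat
  | _, 0 => 0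
  | cap, fuel+1 => if (cap : Int) < size then pvBK size P (cap * P) fuel + 1 else 0

-- the inner `for _ in range(k): q, r = divmod(q, P); digits.append(pool[r])` loop;
-- pool[r] is ported with pyGetD (0 ≤ r < P whenever P ≠ 0, so the index is always in range)
def pvBDigits (pool : List String) (P : Int) : Nat → Int → List String → Int × List String
  | 0, q, ds => (q, ds)
  | k+1, q, ds =>
    pvBDigits pool P k (PySem.Int.floordiv q P)
      (ds ++ [PySem.List.pyGetD pool (PySem.Int.mod q P) ""])

def create_unique_ids_py_alt (size : Int) (pool : Option String) (ids : Option (List String)) : List String :=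
  let poolL := pvPoolList pool
  let ids0 := ids.getD poolL
  let n := ids0.length
  let P := poolL.length
  if size ≤ (n : Int) then PySem.List.slice ids0 none (some size)
  else
    let k := pvBK size P n 64
    (PySem.List.pyRange 0 size 1).map (fun m =>
      let qd := pvBDigits poolL (P : Int) k m []
      -- ids[q] + "".join(reversed(digits))
      PySem.List.pyGetD ids0 qd.1 "" ++ qd.2.reverse.foldl (· ++ ·) "")

-- ===== PRECONDITION & SPEC =====
-- Pre_ excludes exactly the inputs on which A never returns (RecursionError): size exceeding
-- the initial number of ids while the product cannot grow (pool of length < 2, or no ids).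
def Pre_create_unique_ids_py (size : Int) (pool : Option String) (ids : Option (List String)) : Prop :=
  size ≤ ((ids.getD (pvPoolList pool)).length : Int) ∨
    (2 ≤ (pvPoolList pool).length ∧ 1 ≤ (ids.getD (pvPoolList pool)).length)

instance (size : Int) (pool : Option String) (ids : Option (List String)) : Decidable (Pre_create_unique_ids_py size pool ids) := by unfold Pre_create_unique_ids_py; infer_instance

def pvWitness_create_unique_ids_py : Int × Option String × Option (List String) :=
  (10, some "ab", some ["x", "y"])

def Spec_create_unique_ids_py (size : Int) (pool : Option String) (ids : Option (List String)) (out : List String) : Prop := out = create_unique_ids_py_alt size pool ids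
instance (size : Int) (pool : Option String) (ids : Option (List String)) (out : List String) : Decidable (Spec_create_unique_ids_py size pool ids out) := by unfold Spec_create_unique_ids_py; infer_instance

-- ===== CLAIM (what is proved, stated in full; the proofs are below) =====
def Claim_equal_create_unique_ids_py : Prop := ∀ (size : Int) (pool : Option String) (ids : Option (List String)), Dom_create_unique_ids_py size pool ids → Pre_create_unique_ids_py size pool ids → Spec_create_unique_ids_py size pool ids (create_unique_ids_py size pool ids)

-- ===== LEMMAS AND PROOFS =====

-- the level-j product list: lev 0 = ids, lev (j+1) = lev j with one more pool character
def pvLev (pool : List String) : List String → Nat → List String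
  | ids, 0 => ids
  | ids, j+1 => pvLev pool (pvExpand pool ids) j

-- the low-order k base-P digits of m, most significant first, as pool characters
def pvCode (pool : List String) (P : Nat) : Nat → Nat → String
  | 0, _ => ""
  | k+1, m => pvCode pool P k (m / P) ++ PySem.List.pyGetD pool (((m % P : Nat) : Int)) ""

-- the digit list Source B accumulates (least significant first)
def pvDigitList (pool : List String) (P : Nat) : Nat → Nat → List String
  | 0, _ => []
  | k+1, m => PySem.List.pyGetD pool (((m % P : Nat) : Int)) "" :: pvDigitList pool P k (m / P)

theorem pvExpand_length (pool ids : List String) :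
    (pvExpand pool ids).length = ids.length * pool.length := by
  induction ids with
  | nil => simp [pvExpand]
  | cons i ids ih =>
      have hstep : pvExpand pool (i :: ids) = pool.map (fun c => i ++ c) ++ pvExpand pool ids := by
        simp [pvExpand]
      rw [hstep, List.length_append, List.length_map, ih, List.length_cons]; ring

theorem pvLev_length (pool : List String) (j : Nat) : ∀ ids : List String,
    (pvLev pool ids j).length = ids.length * pool.length ^ j := by
  induction j with
  | zero => intro ids; simp [pvLev]
  | succ j ih =>
      intro ids
      show (pvLev pool (pvExpand pool ids) j).length = _
      rw [ih, pvExpand_length, pow_succ]; ring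

theorem pvLev_succ (pool : List String) (j : Nat) : ∀ ids : List String,
    pvLev pool ids (j + 1) = pvExpand pool (pvLev pool ids j) := by
  induction j with
  | zero => intro ids; rfl
  | succ j ih =>
      intro ids
      show pvLev pool (pvExpand pool ids) (j + 1) = _
      rw [ih]; rfl

theorem pvExpand_getElem (pool ids : List String) (a : Nat)
    (ha : a < ids.length * pool.length)
    (h1 : a / pool.length < ids.length) (h2 : a % pool.length < pool.length) :
    (pvExpand pool ids)[a]'(by rw [pvExpand_length]; exact ha) =
      ids[a / pool.length]'h1 ++ pool[a % pool.length]'h2 := by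
  induction ids generalizing a with
  | nil => simp at ha
  | cons i ids ih =>
      have hstep : pvExpand pool (i :: ids) = pool.map (fun c => i ++ c) ++ pvExpand pool ids := by
        simp [pvExpand]
      rcases Nat.lt_or_ge a pool.length with hlt | hge
      · have hd : a / pool.length = 0 := Nat.div_eq_of_lt hlt
        have hm : a % pool.length = a := Nat.mod_eq_of_lt hlt
        simp only [hstep]
        rw [List.getElem_append_left (by simpa using hlt)]
        simp [hd, hm]
      · obtain ⟨b, rfl⟩ : ∃ b, a = pool.length + b := ⟨a - pool.length, by omega⟩
        have hP : 0 < pool.length := by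
          rcases Nat.eq_zero_or_pos pool.length with h0 | h0
          · omega
          · exact h0
        have hd : (pool.length + b) / pool.length = b / pool.length + 1 := by
          rw [Nat.add_div_left _ hP]
        have hm : (pool.length + b) % pool.length = b % pool.length := Nat.add_mod_left _ _
        have hb : b < ids.length * pool.length := by
          have := ha; simp only [List.length_cons] at this; nlinarith
        have hb1 : b / pool.length < ids.length := by
          rw [Nat.div_lt_iff_lt_mul hP]; nlinarith
        simp only [hstep]
        rw [List.getElem_append_right (by simp)]
        have hidx : pool.length + b - (pool.map (fun c => i ++ c)).length = b := by simp
        rw [show ∀ (h : _), (pvExpand pool ids)[pool.length + b - (pool.map (fun c => i ++ c)).length]'h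
              = (pvExpand pool ids)[b]'(by rw [pvExpand_length]; exact hb) from by
            intro h; congr 1]
        rw [ih b hb hb1 (by rw [← hm]; exact h2)]
        congr 1
        · rw [show ∀ (h : _), (i :: ids)[(pool.length + b) / pool.length]'h
                = (i :: ids)[b / pool.length + 1]'(by simpa [hd] using h1) from by
              intro h; congr 1]
          simp
        · congr 1; exact hm.symm

theorem pvLev_getElem (pool : List String) (j : Nat) : ∀ (ids : List String) (a : Nat)
    (ha : a < ids.length * pool.length ^ j)
    (h1 : a / pool.length ^ j < ids.length),
    (pvLev pool ids j)[a]'(by rw [pvLev_length]; exact ha) =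
      ids[a / pool.length ^ j]'h1 ++ pvCode pool pool.length j a := by
  induction j with
  | zero =>
      intro ids a ha h1
      have hidx : a / pool.length ^ 0 = a := by simp
      simp only [pvLev, hidx]
      rw [show pvCode pool pool.length 0 a = "" from rfl, String.append_empty]
  | succ j ih =>
      intro ids a ha h1
      have hP : 0 < pool.length := by
        rcases Nat.eq_zero_or_pos pool.length with h0 | h0
        · exfalso; rw [h0] at ha; simp at ha
        · exact h0
      have hPj : 0 < pool.length ^ j := pow_pos hP j
      have hlev : a < (pvLev pool ids j).length * pool.length := by
        rw [pvLev_length]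
        calc a < ids.length * pool.length ^ (j + 1) := ha
          _ = ids.length * pool.length ^ j * pool.length := by rw [pow_succ]; ring
      have hq : a / pool.length < (pvLev pool ids j).length := by
        rw [pvLev_length, Nat.div_lt_iff_lt_mul hP]
        calc a < ids.length * pool.length ^ (j + 1) := ha
          _ = ids.length * pool.length ^ j * pool.length := by rw [pow_succ]; ring
      have hmod : a % pool.length < pool.length := Nat.mod_lt _ hP
      have hdd : a / pool.length / pool.length ^ j = a / pool.length ^ (j + 1) := by
        rw [Nat.div_div_eq_div_mul, pow_succ']
      have h1' : a / pool.length / pool.length ^ j < ids.length := by rw [hdd]; exact h1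
      have step : (pvLev pool ids (j + 1))[a]'(by rw [pvLev_length]; exact ha) =
          (pvExpand pool (pvLev pool ids j))[a]'(by rw [pvExpand_length]; exact hlev) := by
        congr 1; exact pvLev_succ pool j ids
      rw [step, pvExpand_getElem pool (pvLev pool ids j) a hlev hq hmod,
          ih ids (a / pool.length) (by
            rw [Nat.div_lt_iff_lt_mul hP]
            calc a < ids.length * pool.length ^ (j + 1) := ha
              _ = ids.length * pool.length ^ j * pool.length := by rw [pow_succ]; ring)
            h1']
      have hcode : pvCode pool pool.length (j + 1) a
          = pvCode pool pool.length j (a / pool.length) ++ pool[a % pool.length]'hmod := by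
        show pvCode pool pool.length j (a / pool.length)
              ++ PySem.List.pyGetD pool (((a % pool.length : Nat) : Int)) "" = _
        rw [PySem.List.pyGetD_natCast, List.getD_eq_getElem pool "" hmod]
      rw [hcode, ← String.append_assoc]
      congr 1
      simp only [hdd]

theorem pvBK_suff (size : Int) (P : Nat) (fuel : Nat) : ∀ cap : Nat,
    size.toNat ≤ cap * P ^ fuel → size.toNat ≤ cap * P ^ pvBK size P cap fuel := by
  induction fuel with
  | zero => intro cap h; rw [show pvBK size P cap 0 = 0 from rfl]; simpa using h
  | succ fuel ih =>
      intro cap h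
      by_cases hlt : (cap : Int) < size
      · have hrec := ih (cap * P) (by rw [mul_assoc, ← pow_succ']; exact h)
        rw [show pvBK size P cap (fuel + 1) = pvBK size P (cap * P) fuel + 1 from by
              simp [pvBK, hlt]]
        calc size.toNat ≤ cap * P * P ^ pvBK size P (cap * P) fuel := hrec
          _ = cap * P ^ (pvBK size P (cap * P) fuel + 1) := by rw [pow_succ]; ring
      · rw [show pvBK size P cap (fuel + 1) = 0 from by simp [pvBK, hlt]]
        simp; omega

theorem pvALoop_eq (size : Int) (pool : List String) (hs : 0 ≤ size) (fuel : Nat) :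
    ∀ ids : List String, size.toNat ≤ ids.length * pool.length ^ fuel →
    pvALoop size pool ids fuel =
      (pvLev pool ids (pvBK size pool.length ids.length fuel)).take size.toNat := by
  induction fuel with
  | zero =>
      intro ids h
      show PySem.List.slice ids none (some size) = _
      rw [PySem.List.slice_to ids hs]
      rfl
  | succ fuel ih =>
      intro ids h
      by_cases hle : size ≤ (ids.length : Int)
      · rw [show pvALoop size pool ids (fuel + 1) = PySem.List.slice ids none (some size) from by
              simp [pvALoop, hle]]
        rw [PySem.List.slice_to ids hs]
        rw [show pvBK size pool.length ids.length (fuel + 1) = 0 from by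
              simp only [pvBK, if_neg (show ¬((ids.length : Int) < size) by omega)]]
        rfl
      · have hlt : (ids.length : Int) < size := by omega
        rw [show pvALoop size pool ids (fuel + 1) = pvALoop size pool (pvExpand pool ids) fuel from by
              simp [pvALoop, hle]]
        rw [show pvBK size pool.length ids.length (fuel + 1)
              = pvBK size pool.length (ids.length * pool.length) fuel + 1 from by
              simp [pvBK, hlt]]
        have h' : size.toNat ≤ (pvExpand pool ids).length * pool.length ^ fuel := by
          rw [pvExpand_length, mul_assoc, ← pow_succ']; exact h
        rw [ih (pvExpand pool ids) h']
        rw [pvExpand_length]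
        rfl

theorem pvBDigits_eq (pool : List String) (k : Nat) : ∀ (m : Nat) (ds : List String),
    pvBDigits pool (pool.length : Int) k (m : Int) ds =
      (((m / pool.length ^ k : Nat) : Int), ds ++ pvDigitList pool pool.length k m) := by
  induction k with
  | zero => intro m ds; simp [pvBDigits, pvDigitList]
  | succ k ih =>
      intro m ds
      show pvBDigits pool (pool.length : Int) k
            (PySem.Int.floordiv (m : Int) (pool.length : Int))
            (ds ++ [PySem.List.pyGetD pool (PySem.Int.mod (m : Int) (pool.length : Int)) ""]) = _
      rw [PySem.Int.floordiv_natCast, PySem.Int.mod_natCast, ih]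
      rw [Nat.div_div_eq_div_mul, ← pow_succ']
      rw [show pvDigitList pool pool.length (k + 1) m
            = PySem.List.pyGetD pool (((m % pool.length : Nat) : Int)) ""
                :: pvDigitList pool pool.length k (m / pool.length) from rfl]
      simp

theorem pvDigits_join (pool : List String) (k : Nat) : ∀ m : Nat,
    (pvDigitList pool pool.length k m).reverse.foldl (· ++ ·) "" =
      pvCode pool pool.length k m := by
  induction k with
  | zero => intro m; rfl
  | succ k ih =>
      intro m
      show (PySem.List.pyGetD pool (((m % pool.length : Nat) : Int)) ""
              :: pvDigitList pool pool.length k (m / pool.length)).reverse.foldl (· ++ ·) "" = _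
      rw [List.reverse_cons, List.foldl_append, ih]
      rfl

-- ===== VERDICT (by name: the statement is the Claim_ definition above) =====
theorem create_unique_ids_py_spec : Claim_equal_create_unique_ids_py := by
  intro size pool ids hDom hPre
  unfold Spec_create_unique_ids_py
  unfold create_unique_ids_py create_unique_ids_py_alt
  set poolL := pvPoolList pool with hpoolL
  set ids0 := ids.getD poolL with hids0
  simp only []
  by_cases hle : size ≤ (ids0.length : Int)
  · -- both return ids[:size]
    rw [if_pos hle]
    rw [show (64 : Nat) = 63 + 1 from rfl]
    show (if size ≤ (ids0.length : Int) then PySem.List.slice ids0 none (some size)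
          else pvALoop size poolL (pvExpand poolL ids0) 63) = _
    rw [if_pos hle]
  · rw [if_neg hle]
    have hP : 2 ≤ poolL.length ∧ 1 ≤ ids0.length := by
      rcases hPre with h | h
      · exact absurd h hle
      · exact h
    have hs : 0 ≤ size := by omega
    have hsize : size ≤ 2147483648 := by
      unfold Dom_create_unique_ids_py pvDomInt at hDom
      simp only [Bool.and_eq_true, decide_eq_true_eq] at hDom
      exact hDom.1.1.2
    have hbound : size.toNat ≤ ids0.length * poolL.length ^ 64 := by
      have h1 : size.toNat ≤ 2 ^ 64 := by
        have : (2147483648 : Nat) ≤ 2 ^ 64 := by norm_num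
        omega
      calc size.toNat ≤ 2 ^ 64 := h1
        _ ≤ poolL.length ^ 64 := Nat.pow_le_pow_left hP.1 64
        _ = 1 * poolL.length ^ 64 := (Nat.one_mul _).symm
        _ ≤ ids0.length * poolL.length ^ 64 := Nat.mul_le_mul_right _ hP.2
    set k := pvBK size poolL.length ids0.length 64 with hk
    have hcap : size.toNat ≤ ids0.length * poolL.length ^ k := pvBK_suff size _ 64 ids0.length hbound
    rw [pvALoop_eq size poolL hs 64 ids0 hbound, ← hk]
    have hPk : 0 < poolL.length ^ k := pow_pos (show 0 < poolL.length by omega) k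
    -- compare the two lists elementwise
    rw [PySem.List.pyRange_one]
    apply List.ext_getElem
    · simp only [List.length_take, List.length_map, List.length_range, pvLev_length]
      omega
    · intro i h1 h2
      have hi : i < size.toNat := by
        simp only [List.length_take, pvLev_length] at h1; omega
      have hilt : i < ids0.length * poolL.length ^ k := lt_of_lt_of_le hi hcap
      have hqlt : i / poolL.length ^ k < ids0.length := by
        rw [Nat.div_lt_iff_lt_mul hPk]; exact hilt
      rw [List.getElem_take]
      simp only [List.getElem_map, List.getElem_range, zero_add]
      rw [pvBDigits_eq poolL k i []]
      simp only [List.nil_append]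
      rw [pvDigits_join poolL k i]
      rw [PySem.List.pyGetD_natCast]
      rw [List.getD_eq_getElem ids0 "" hqlt]
      exact pvLev_getElem poolL k ids0 i hilt hqlt
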